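-- pv_equiv track=rewrite | github.com/miliar/Code_Jam_Webscraper | solutions_python/Problem_155/1235.py | solve
-- ===== SOURCE A (Python) =====
-- def solve(shyness):
-- 	total = shyness[0]
-- 	invited = 0
-- 	for i in range(1, len(shyness)):
-- 		if shyness[i] != 0 and total < i: #check if need to invite
-- 			extra = i - total
-- 			invited += extra
-- 			total += extra
-- 		total += shyness[i]
-- 	return invited
-- ===== SOURCE B (Python) =====
-- def solve(shyness):
--     # stage 1: prefix sums, prefix[k] = shyness[0] + ... + shyness[k]
--     prefix = []
--     cum = 0
--     for x in shyness:
--         cum += x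
--         prefix.append(cum)
--     # stage 2: the answer is the largest deficit i - prefix[i-1] over
--     # positions i with shyness[i] != 0, floored at 0
--     deficits = [i - prefix[i - 1] for i in range(1, len(shyness)) if shyness[i] != 0]
--     return max([0] + deficits)
-- ===== Notes on version B (the rewrite author's own statement) =====
-- stated objective: alternative
-- what changed: Replaces A's single-pass greedy mutation (bump a running total and accumulate extras) with two staged passes: first build the full prefix-sum list, then take the maximum of the nonnegative deficits i - prefix[i-1] over nonzero positions via a comprehension.
import Mathlib
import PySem

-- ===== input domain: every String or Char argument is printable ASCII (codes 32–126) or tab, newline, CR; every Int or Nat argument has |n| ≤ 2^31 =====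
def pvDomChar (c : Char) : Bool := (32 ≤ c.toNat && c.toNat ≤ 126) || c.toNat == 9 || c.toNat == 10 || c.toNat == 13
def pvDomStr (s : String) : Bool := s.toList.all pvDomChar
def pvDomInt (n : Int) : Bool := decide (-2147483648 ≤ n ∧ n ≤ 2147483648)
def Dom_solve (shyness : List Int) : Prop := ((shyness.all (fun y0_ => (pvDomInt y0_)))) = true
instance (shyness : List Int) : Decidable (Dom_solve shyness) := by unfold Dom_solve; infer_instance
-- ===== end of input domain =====

-- B replaces A's single-pass greedy running-total mutation with two staged passes:
-- build the prefix-sum list, then take the maximum deficit i - prefix[i-1] over nonzero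
-- positions, kept nonnegative (alternative decomposition, same cost).

-- ===== PORT A =====
def solve (shyness : List Int) : Int :=
  -- total = shyness[0]; under Pre_solve the list is nonempty so the read succeeds
  let total0 : Int := (PySem.List.pyGet? shyness 0).getD 0
  (List.foldl
    (fun (st : Int × Int) (i : Int) =>
      let si : Int := (PySem.List.pyGet? shyness i).getD 0  -- in range: 1 ≤ i < len
      let total := st.1
      let invited := st.2
      if si ≠ 0 ∧ total < i then
        let extra := i - total
        (total + extra + si, invited + extra)
      else
        (total + si, invited))
    (total0, 0) (PySem.List.pyRange 1 shyness.length 1)).2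

-- ===== PORT B =====
def solve_alt (shyness : List Int) : Int :=
  -- stage 1: prefix sums (cum is st.1, prefix is st.2, appended in order)
  let prefixl : List Int :=
    (List.foldl (fun (st : Int × List Int) (x : Int) => (st.1 + x, st.2 ++ [st.1 + x]))
      (0, []) shyness).2
  -- stage 2: comprehension [i - prefix[i-1] for i in range(1, len) if shyness[i] != 0]
  let deficits : List Int :=
    ((PySem.List.pyRange 1 shyness.length 1).filter
        (fun i => decide ((PySem.List.pyGet? shyness i).getD 0 ≠ 0))).map
      (fun i => i - (PySem.List.pyGet? prefixl (i - 1)).getD 0)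
  -- max([0] + deficits)
  List.foldl max 0 deficits

-- ===== PRECONDITION & SPEC =====
-- Pre_ excludes only the empty list, on which A raises IndexError reading the first element.
def Pre_solve (shyness : List Int) : Prop := shyness ≠ []
instance (shyness : List Int) : Decidable (Pre_solve shyness) := by unfold Pre_solve; infer_instance
def pvWitness_solve : List Int := ([1, 0, 2])
def Spec_solve (shyness : List Int) (out : Int) : Prop := out = solve_alt shyness
instance (shyness : List Int) (out : Int) : Decidable (Spec_solve shyness out) := by unfold Spec_solve; infer_instance

-- ===== CLAIM (what is proved, stated in full; the proofs are below) =====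
def Claim_equal_solve : Prop := ∀ (shyness : List Int), Dom_solve shyness → Pre_solve shyness → Spec_solve shyness (solve shyness)

-- ===== LEMMAS AND PROOFS =====

-- prefAux c l = the prefix sums of l starting from running total c
def prefAux (c : Int) : List Int → List Int
  | [] => []
  | x :: xs => (c + x) :: prefAux (c + x) xs

theorem pref_fold (l : List Int) (c : Int) (acc : List Int) :
    List.foldl (fun (st : Int × List Int) (x : Int) => (st.1 + x, st.2 ++ [st.1 + x]))
      (c, acc) l = (c + l.sum, acc ++ prefAux c l) := by
  induction l generalizing c acc with
  | nil => simp [prefAux]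
  | cons x xs ih => simp [prefAux, ih (c + x) (acc ++ [c + x])]; ring

theorem pref_get (l : List Int) (c : Int) (k : Nat) (hk : k < l.length) :
    (prefAux c l)[k]? = some (c + (l.take (k + 1)).sum) := by
  induction l generalizing c k with
  | nil => simp at hk
  | cons x xs ih =>
    cases k with
    | zero => simp [prefAux]
    | succ k =>
      simp only [prefAux, List.getElem?_cons_succ, List.take_succ_cons, List.sum_cons]
      rw [ih (c + x) k (by simpa using hk)]
      congr 1; ring

-- the list of deficits produced while scanning indices l with running total c
def mdef (shyness : List Int) (c : Int) : List Int → List Int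
  | [] => []
  | i :: l =>
    let si : Int := (PySem.List.pyGet? shyness i).getD 0
    (if si ≠ 0 then [i - c] else []) ++ mdef shyness (c + si) l

-- A's fold, started at total = c + inv, returns foldl max inv over the deficit list
theorem a_fold_eq (shyness : List Int) (l : List Int) (c inv : Int) :
    (List.foldl
      (fun (st : Int × Int) (i : Int) =>
        let si : Int := (PySem.List.pyGet? shyness i).getD 0
        let total := st.1
        let invited := st.2
        if si ≠ 0 ∧ total < i then
          let extra := i - total
          (total + extra + si, invited + extra)
        else
          (total + si, invited))
      (c + inv, inv) l).2
    = List.foldl max inv (mdef shyness c l) := by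
  induction l generalizing c inv with
  | nil => rfl
  | cons i l ih =>
    simp only [List.foldl_cons, mdef]
    by_cases hsi : (PySem.List.pyGet? shyness i).getD 0 ≠ 0
    · by_cases hlt : c + inv < i
      · have h1 : max inv (i - c) = i - c := by omega
        have e1 : i + (PySem.List.pyGet? shyness i).getD 0
            = (c + (PySem.List.pyGet? shyness i).getD 0) + (i - c) := by ring
        have e2 : inv + (i - (c + inv)) = i - c := by ring
        simpa [hsi, hlt, h1, e1, e2] using
          ih (c + (PySem.List.pyGet? shyness i).getD 0) (i - c)
      · have h1 : max inv (i - c) = inv := by omega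
        have h2 : c + inv + (PySem.List.pyGet? shyness i).getD 0
            = (c + (PySem.List.pyGet? shyness i).getD 0) + inv := by ring
        simpa [hsi, hlt, h1, h2] using
          ih (c + (PySem.List.pyGet? shyness i).getD 0) inv
    · have h2 : c + inv + (PySem.List.pyGet? shyness i).getD 0
          = (c + (PySem.List.pyGet? shyness i).getD 0) + inv := by ring
      simpa [hsi, h2] using ih (c + (PySem.List.pyGet? shyness i).getD 0) inv

-- B's map-over-filter over the tail of the range equals mdef with running total = prefix sum
theorem mdef_range (shyness : List Int) (a : Nat) (ha : 1 ≤ a) :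
    ((PySem.List.pyRange (a : Int) shyness.length 1).filter
        (fun i => decide ((PySem.List.pyGet? shyness i).getD 0 ≠ 0))).map
      (fun i => i - (PySem.List.pyGet? (prefAux 0 shyness) (i - 1)).getD 0)
    = mdef shyness ((shyness.take a).sum) (PySem.List.pyRange (a : Int) shyness.length 1) := by
  by_cases hb : a < shyness.length
  · have hcons : PySem.List.pyRange (a : Int) shyness.length 1
        = (a : Int) :: PySem.List.pyRange ((a : Int) + 1) shyness.length 1 :=
      PySem.List.pyRange_one_cons (by exact_mod_cast hb)
    have hpg : (PySem.List.pyGet? (prefAux 0 shyness) ((a : Int) - 1)).getD 0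
        = (shyness.take a).sum := by
      have h1 : ((a : Int) - 1) = ((a - 1 : Nat) : Int) := by omega
      rw [h1, PySem.List.pyGet?_natCast,
        pref_get shyness 0 (a - 1) (by omega)]
      have : a - 1 + 1 = a := by omega
      simp [this]
    have hsa : (PySem.List.pyGet? shyness (a : Int)).getD 0 = shyness[a] := by
      rw [PySem.List.pyGet?_natCast]; simp [hb]
    have hsum : (shyness.take (a + 1)).sum = (shyness.take a).sum + shyness[a] :=
      List.sum_take_succ shyness a hb
    have hcast : ((a : Int) + 1) = ((a + 1 : Nat) : Int) := by push_cast; ring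
    have ih := mdef_range shyness (a + 1) (by omega)
    rw [← hcast] at ih
    rw [hcons]
    simp only [List.filter_cons, mdef, hsa]
    split_ifs with h1 h2 h3
    · simp only [List.map_cons, hpg, List.cons_append, List.nil_append]
      rw [← hsum, ih]
    · simp only [decide_eq_true_eq] at h1
      exact absurd h1 h2
    · exact absurd (decide_eq_true h3) h1
    · rw [List.nil_append, ← hsum, ih]
  · have hnil : PySem.List.pyRange (a : Int) shyness.length 1 = [] :=
      PySem.List.pyRange_one_eq_nil (by exact_mod_cast Nat.le_of_not_lt hb)
    simp [hnil, mdef]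
termination_by shyness.length - a

-- ===== VERDICT (by name: the statement is the Claim_ definition above) =====
theorem solve_spec : Claim_equal_solve := by
  intro shyness _ hpre
  unfold Spec_solve solve solve_alt
  obtain ⟨y, ys, rfl⟩ := List.exists_cons_of_ne_nil hpre
  have h0 : (PySem.List.pyGet? (y :: ys) 0).getD 0 = y := by
    simp
  have h1 : ((y :: ys).take 1).sum = y := by simp
  simp only [h0, pref_fold (y :: ys) 0 [], List.nil_append]
  have hm := mdef_range (y :: ys) 1 le_rfl
  simp only [Nat.cast_one] at hm
  rw [hm, h1]
  have := a_fold_eq (y :: ys) (PySem.List.pyRange 1 (y :: ys).length 1) y 0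
  simpa using this
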